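-- pv_equiv track=rewrite | github.com/smaillot/hash-code-training | pizza/solution.py | generate_all_slices
-- ===== SOURCE A (Python) =====
-- def generate_all_slices(R, C, L, H):
--     '''Specific
--     L : minimum number of each ingredient in a slice
--     H : max size for a slice
--     We generate all the possible slices that we can make out of the pizza. We know that their size (or area) is between 2 * L and H
--     The generated slices start at 0, 0
--     '''
--     list_of_slices = []
--     for A in range(2 * L, H + 1):
--
--         for row_size in range(1, A + 1):
--
--             if A % row_size == 0:
--                 column_size = A // row_size
--                 if column_size < (C + 1):
--                     list_of_slices.append([0, 0, row_size - 1, column_size - 1])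
--
--     return list_of_slices
-- ===== SOURCE B (Python) =====
-- def generate_all_slices(R, C, L, H):
--     '''Divisor-pair enumeration: for each area A, find divisors only up to
--     sqrt(A) and recover the large ones as cofactors, so each area costs
--     O(sqrt(A)) instead of O(A).'''
--     list_of_slices = []
--     start = 2 * L if 2 * L > 1 else 1
--     for A in range(start, H + 1):
--         small = []
--         large = []
--         d = 1
--         while d * d <= A:
--             if A % d == 0:
--                 small.append(d)
--                 q = A // d
--                 if q != d:
--                     large.append(q)
--             d += 1
--         for row_size in small + large[::-1]:
--             column_size = A // row_size
--             if column_size <= C: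
--                 list_of_slices.append([0, 0, row_size - 1, column_size - 1])
--     return list_of_slices
-- ===== Notes on version B (the rewrite author's own statement) =====
-- stated objective: alternative
-- what changed: Instead of testing every candidate row size 1..A for each area A, B enumerates only divisors d up to sqrt(A) and recovers the large divisors as cofactors A//d (appended in reverse to keep row sizes increasing), and starts the area loop at max(2*L, 1) since non-positive areas contribute nothing.
import Mathlib
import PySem

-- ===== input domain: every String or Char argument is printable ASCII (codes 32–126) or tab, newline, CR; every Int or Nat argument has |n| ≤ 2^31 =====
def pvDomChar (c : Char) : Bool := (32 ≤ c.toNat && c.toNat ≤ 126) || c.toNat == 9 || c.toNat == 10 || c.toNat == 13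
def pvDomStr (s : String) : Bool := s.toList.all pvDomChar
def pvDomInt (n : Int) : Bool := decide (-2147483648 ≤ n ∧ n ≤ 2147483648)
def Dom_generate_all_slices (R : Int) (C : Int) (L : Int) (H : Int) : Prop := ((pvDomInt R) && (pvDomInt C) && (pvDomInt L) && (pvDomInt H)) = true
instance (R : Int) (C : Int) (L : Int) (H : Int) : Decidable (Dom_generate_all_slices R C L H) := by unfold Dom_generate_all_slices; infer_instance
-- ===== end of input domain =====

-- B replaces A's linear scan of all candidate row sizes 1..A by a divisor-pair
-- enumeration up to sqrt(A) (small divisors and their cofactors), visiting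
-- O(sqrt(A)) candidates per area instead of A.

-- ===== PORT A =====
def generate_all_slices (R : Int) (C : Int) (L : Int) (H : Int) : List (List Int) :=
  (PySem.List.pyRange (2 * L) (H + 1) 1).foldl (fun list_of_slices A =>
    (PySem.List.pyRange 1 (A + 1) 1).foldl (fun acc row_size =>
      if PySem.Int.mod A row_size = 0 then
        let column_size := PySem.Int.floordiv A row_size
        if column_size < C + 1 then acc ++ [[0, 0, row_size - 1, column_size - 1]]
        else acc
      else acc) list_of_slices) []

-- ===== PORT B =====
-- termination measure lemma for pvDivLoop (cited by name in decreasing_by)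
lemma pvDivLoop_dec (A d : Int) (h : d * d ≤ A) :
    (A + 1 - (d + 1)).toNat < (A + 1 - d).toNat := by
  have hd : d ≤ d * d := by
    by_cases h0 : d ≤ 0
    · exact le_trans h0 (mul_self_nonneg d)
    · calc d = d * 1 := (mul_one d).symm
        _ ≤ d * d := mul_le_mul_of_nonneg_left (by omega) (by omega)
  omega

-- the 'while d * d <= A' loop of Source B, accumulating small divisors and their cofactors
def pvDivLoop (A : Int) (d : Int) (small : List Int) (large : List Int) : List Int × List Int :=
  if h : d * d ≤ A then
    if PySem.Int.mod A d = 0 then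
      let q := PySem.Int.floordiv A d
      pvDivLoop A (d + 1) (small ++ [d]) (if q ≠ d then large ++ [q] else large)
    else pvDivLoop A (d + 1) small large
  else (small, large)
termination_by (A + 1 - d).toNat
decreasing_by
  · exact pvDivLoop_dec A d h
  · exact pvDivLoop_dec A d h
  
def generate_all_slices_alt (R : Int) (C : Int) (L : Int) (H : Int) : List (List Int) :=
  let start := if 2 * L > 1 then 2 * L else 1
  (PySem.List.pyRange start (H + 1) 1).foldl (fun list_of_slices A =>
    let p := pvDivLoop A 1 [] []
    (p.1 ++ p.2.reverse).foldl (fun acc row_size =>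
      let column_size := PySem.Int.floordiv A row_size
      if column_size ≤ C then acc ++ [[0, 0, row_size - 1, column_size - 1]]
      else acc) list_of_slices) []

-- ===== PRECONDITION & SPEC =====
def Spec_generate_all_slices (R : Int) (C : Int) (L : Int) (H : Int) (out : List (List Int)) : Prop := out = generate_all_slices_alt R C L H
instance (R : Int) (C : Int) (L : Int) (H : Int) (out : List (List Int)) : Decidable (Spec_generate_all_slices R C L H out) := by unfold Spec_generate_all_slices; infer_instance

-- ===== CLAIM (what is proved, stated in full; the proofs are below) =====
def Claim_equal_generate_all_slices : Prop := ∀ (R : Int) (C : Int) (L : Int) (H : Int), Dom_generate_all_slices R C L H → Spec_generate_all_slices R C L H (generate_all_slices R C L H)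

-- ===== LEMMAS AND PROOFS =====

-- integer square root of A (0 for negative A), as an Int
def pvSqrt (A : Int) : Int := ((Nat.sqrt A.toNat : Nat) : Int)

-- the slice emitted for area A and row size r
def pvG (A r : Int) : List Int := [0, 0, r - 1, PySem.Int.floordiv A r - 1]

-- small divisors of A (those ≤ sqrt A), in increasing order, from position d on
def pvS (A d : Int) : List Int :=
  (PySem.List.pyRange d (pvSqrt A + 1) 1).filter (fun r => decide (PySem.Int.mod A r = 0))

-- cofactor map used by the loop
def pvCof (A d : Int) : Option Int :=
  if PySem.Int.floordiv A d ≠ d then some (PySem.Int.floordiv A d) else none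

lemma pvSqrt_spec (A : Int) (d : Int) (hd : 1 ≤ d) : d * d ≤ A ↔ d ≤ pvSqrt A := by
  have hd0 : (0:Int) ≤ d := by omega
  by_cases hA : 0 ≤ A
  · constructor
    · intro h
      have hm : d.toNat * d.toNat ≤ A.toNat := by
        have h1 : ((d.toNat * d.toNat : Nat) : Int) ≤ ((A.toNat : Nat) : Int) := by
          push_cast
          rw [Int.toNat_of_nonneg hd0, Int.toNat_of_nonneg hA]
          exact h
        exact_mod_cast h1
      have h2 := Nat.le_sqrt.mpr hm
      unfold pvSqrt
      omega
    · intro h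
      have hm : d.toNat ≤ Nat.sqrt A.toNat := by unfold pvSqrt at h; omega
      have h2 := Nat.le_sqrt.mp hm
      calc d * d = ((d.toNat * d.toNat : Nat) : Int) := by
            push_cast; rw [Int.toNat_of_nonneg hd0]
        _ ≤ ((A.toNat : Nat) : Int) := by exact_mod_cast h2
        _ = A := Int.toNat_of_nonneg hA
  · have hA0 : A.toNat = 0 := by omega
    constructor
    · intro h; nlinarith
    · intro h; exfalso; unfold pvSqrt at h; rw [hA0] at h; simp [Nat.sqrt_zero] at h; omega

lemma pvDivLoop_spec (A : Int) (d : Int) (hd : 1 ≤ d) (small large : List Int) :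
    pvDivLoop A d small large =
      (small ++ pvS A d, large ++ (pvS A d).filterMap (pvCof A)) := by
  have key : ∀ (n : Nat) (d : Int), (pvSqrt A + 1 - d).toNat = n → 1 ≤ d →
      ∀ small large, pvDivLoop A d small large =
        (small ++ pvS A d, large ++ (pvS A d).filterMap (pvCof A)) := by
    intro n
    induction n using Nat.strong_induction_on with
    | _ n ih =>
      intro d hn hd1 small large
      rw [pvDivLoop]
      by_cases hc : d * d ≤ A
      · have hds : d ≤ pvSqrt A := (pvSqrt_spec A d hd1).mp hc
        have hcons : pvS A d = if PySem.Int.mod A d = 0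
            then d :: pvS A (d + 1) else pvS A (d + 1) := by
          unfold pvS
          rw [PySem.List.pyRange_one_cons (by omega)]
          by_cases hm : PySem.Int.mod A d = 0 <;> simp [hm]
        have hmeas : (pvSqrt A + 1 - (d + 1)).toNat < n := by omega
        by_cases hm : PySem.Int.mod A d = 0
        · rw [dif_pos hc, if_pos hm]
          rw [ih _ hmeas (d + 1) rfl (by omega)]
          rw [hcons, if_pos hm]
          by_cases hq : PySem.Int.floordiv A d ≠ d
          · simp only [if_pos hq, List.filterMap_cons, pvCof, List.append_assoc,
              List.cons_append, List.nil_append]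
          · simp only [if_neg hq, List.filterMap_cons, pvCof, List.append_assoc,
              List.cons_append, List.nil_append]
        · rw [dif_pos hc, if_neg hm]
          rw [ih _ hmeas (d + 1) rfl (by omega)]
          rw [hcons, if_neg hm]
      · have hds : ¬ d ≤ pvSqrt A := fun h => hc ((pvSqrt_spec A d hd1).mpr h)
        have hnil : pvS A d = [] := by
          unfold pvS
          rw [PySem.List.pyRange_one_eq_nil (by omega)]
          rfl
        rw [dif_neg hc, hnil]
        simp
  exact key _ d rfl hd small large

lemma pvSqrt_pos (A : Int) (hA : 1 ≤ A) : 1 ≤ pvSqrt A := by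
  unfold pvSqrt
  have h : 0 < Nat.sqrt A.toNat := Nat.sqrt_pos.mpr (by omega)
  omega

lemma pvSqrt_mul_le (A : Int) (hA : 0 ≤ A) : pvSqrt A * pvSqrt A ≤ A := by
  have h := Nat.sqrt_le A.toNat
  have h2 : ((Nat.sqrt A.toNat : Nat) : Int) * ((Nat.sqrt A.toNat : Nat) : Int) ≤ ((A.toNat : Nat) : Int) := by
    exact_mod_cast h
  rw [Int.toNat_of_nonneg hA] at h2
  exact h2

lemma pvSqrt_succ_gt (A : Int) (hA : 0 ≤ A) : A < (pvSqrt A + 1) * (pvSqrt A + 1) := by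
  have h := Nat.lt_succ_sqrt A.toNat
  have h2 : ((A.toNat : Nat) : Int) <
      ((Nat.succ (Nat.sqrt A.toNat) : Nat) : Int) * ((Nat.succ (Nat.sqrt A.toNat) : Nat) : Int) := by
    exact_mod_cast h
  rw [Int.toNat_of_nonneg hA] at h2
  push_cast at h2
  unfold pvSqrt
  push_cast
  linarith

lemma pvMem_small (A m : Int) :
    m ∈ pvS A 1 ↔ 1 ≤ m ∧ m ≤ pvSqrt A ∧ PySem.Int.mod A m = 0 := by
  unfold pvS
  simp only [List.mem_filter, PySem.List.mem_pyRange_one, decide_eq_true_eq]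
  constructor
  · rintro ⟨⟨h1, h2⟩, h3⟩; exact ⟨h1, by omega, h3⟩
  · rintro ⟨h1, h2, h3⟩; exact ⟨⟨h1, by omega⟩, h3⟩

lemma pvQ_facts (A m : Int) (hA : 1 ≤ A) (hm : 1 ≤ m) (hdvd : m ∣ A) :
    PySem.Int.floordiv A m * m = A ∧ 1 ≤ PySem.Int.floordiv A m ∧
      PySem.Int.floordiv A m ≤ A ∧ PySem.Int.floordiv A m ∣ A ∧
      PySem.Int.floordiv A (PySem.Int.floordiv A m) = m := by
  have hm0 : (0:Int) < m := by omega
  have hqm : PySem.Int.floordiv A m * m = A := by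
    rw [PySem.Int.floordiv_eq_ediv_of_pos hm0]
    exact Int.ediv_mul_cancel hdvd
  set q := PySem.Int.floordiv A m with hq
  have hq1 : 1 ≤ q := by nlinarith
  have hqA : q ≤ A := by nlinarith
  have hqd : q ∣ A := ⟨m, hqm.symm⟩
  refine ⟨hqm, hq1, hqA, hqd, ?_⟩
  rw [PySem.Int.floordiv_eq_ediv_of_pos (by omega : (0:Int) < q), ← hqm,
    Int.mul_ediv_cancel_left m (by omega : q ≠ 0)]

lemma pvLarge_gt (A m : Int) (hA : 1 ≤ A) (hm1 : 1 ≤ m) (hms : m ≤ pvSqrt A)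
    (hdvd : m ∣ A) (hne : PySem.Int.floordiv A m ≠ m) :
    pvSqrt A < PySem.Int.floordiv A m := by
  obtain ⟨hqm, hq1, -, -, -⟩ := pvQ_facts A m hA hm1 hdvd
  set q := PySem.Int.floordiv A m
  set s := pvSqrt A
  have hss := pvSqrt_mul_le A (by omega)
  have hs1 : 1 ≤ s := pvSqrt_pos A hA
  by_contra hle
  push_neg at hle
  have heq : q * m = s * s := by nlinarith
  have hmeq : m = s := by nlinarith
  have hqeq : q = s := by
    have h : q * s = s * s := by rw [hmeq] at heq; exact heq
    exact mul_right_cancel₀ (by omega) h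
  exact hne (by omega)

lemma pvCof_back (A m : Int) (hA : 1 ≤ A) (hs : pvSqrt A < m) (hmA : m ≤ A) (hdvd : m ∣ A) :
    PySem.Int.floordiv A m ∈ pvS A 1 ∧ pvCof A (PySem.Int.floordiv A m) = some m := by
  have hs1 : 1 ≤ pvSqrt A := pvSqrt_pos A hA
  have hm1 : 1 ≤ m := by omega
  obtain ⟨hqm, hq1, hqA, hqd, hback⟩ := pvQ_facts A m hA hm1 hdvd
  set q := PySem.Int.floordiv A m with hqdef
  have hsucc := pvSqrt_succ_gt A (by omega)
  have hqs : q ≤ pvSqrt A := by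
    by_contra hgt
    push_neg at hgt
    nlinarith
  have hmod : PySem.Int.mod A q = 0 := (PySem.Int.mod_eq_zero_iff_dvd A q).mpr hqd
  refine ⟨(pvMem_small A q).mpr ⟨hq1, hqs, hmod⟩, ?_⟩
  unfold pvCof
  rw [hback]
  have hne : m ≠ q := by omega
  simp [hne]

lemma pvDiv_antitone (A m1 m2 : Int) (hA : 1 ≤ A) (h1 : 1 ≤ m1) (h2 : 1 ≤ m2)
    (hd1 : m1 ∣ A) (hd2 : m2 ∣ A) (hlt : m1 < m2) :
    PySem.Int.floordiv A m2 < PySem.Int.floordiv A m1 := by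
  obtain ⟨e1, f1, -, -, -⟩ := pvQ_facts A m1 hA h1 hd1
  obtain ⟨e2, f2, -, -, -⟩ := pvQ_facts A m2 hA h2 hd2
  by_contra hle
  push_neg at hle
  nlinarith

lemma pvCof_some (A a x : Int) (h : pvCof A a = some x) :
    x = PySem.Int.floordiv A a ∧ PySem.Int.floordiv A a ≠ a := by
  unfold pvCof at h
  by_cases hne : PySem.Int.floordiv A a ≠ a
  · rw [if_pos hne] at h
    exact ⟨(Option.some.injEq _ _ ▸ h).symm, hne⟩
  · rw [if_neg hne] at h
    exact absurd h (by simp)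

lemma pvMem_large (A m : Int) (hA : 1 ≤ A)
    (h : m ∈ (pvS A 1).filterMap (pvCof A)) :
    pvSqrt A < m ∧ m ≤ A ∧ PySem.Int.mod A m = 0 := by
  rcases List.mem_filterMap.mp h with ⟨b, hb, hcof⟩
  rcases (pvMem_small A b).mp hb with ⟨hb1, hbs, hbm⟩
  have hbd : b ∣ A := (PySem.Int.mod_eq_zero_iff_dvd A b).mp hbm
  obtain ⟨hx, hne⟩ := pvCof_some A b m hcof
  obtain ⟨-, -, hqA, hqd, -⟩ := pvQ_facts A b hA hb1 hbd
  have hgt := pvLarge_gt A b hA hb1 hbs hbd hne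
  subst hx
  exact ⟨hgt, hqA, (PySem.Int.mod_eq_zero_iff_dvd A _).mpr hqd⟩

lemma pvPairwise_filterMap {α β : Type} {R : β → β → Prop} (f : α → Option β) {l : List α}
    (h : l.Pairwise (fun a b => ∀ x, f a = some x → ∀ y, f b = some y → R x y)) :
    (l.filterMap f).Pairwise R := by
  induction l with
  | nil => simp
  | cons a t ih =>
    rcases List.pairwise_cons.mp h with ⟨ha, ht⟩
    rw [List.filterMap_cons]
    cases hfa : f a with
    | none => exact ih ht
    | some x =>
      refine List.pairwise_cons.mpr ⟨?_, ih ht⟩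
      intro y hy
      rcases List.mem_filterMap.mp hy with ⟨b, hb, hfb⟩
      exact ha b hb x hfa y hfb

lemma pvSortedExt : ∀ (l₁ l₂ : List Int), l₁.Pairwise (· < ·) → l₂.Pairwise (· < ·) →
    (∀ x, x ∈ l₁ ↔ x ∈ l₂) → l₁ = l₂ := by
  intro l₁
  induction l₁ with
  | nil =>
    intro l₂ _ _ h
    cases l₂ with
    | nil => rfl
    | cons b u => exact absurd ((h b).mpr (by simp)) (by simp)
  | cons a t ih =>
    intro l₂ h₁ h₂ h
    cases l₂ with
    | nil => exact absurd ((h a).mp (by simp)) (by simp)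
    | cons b u =>
      rcases List.pairwise_cons.mp h₁ with ⟨ha, ht⟩
      rcases List.pairwise_cons.mp h₂ with ⟨hb, hu⟩
      have hab : a = b := by
        rcases List.mem_cons.mp ((h a).mp (by simp)) with h' | h'
        · exact h'
        · rcases List.mem_cons.mp ((h b).mpr (by simp)) with h'' | h''
          · exact h''.symm
          · have g1 := ha b h''
            have g2 := hb a h'
            omega
      subst hab
      have ht' : ∀ x, x ∈ t ↔ x ∈ u := by
        intro x
        constructor
        · intro hx
          rcases List.mem_cons.mp ((h x).mp (List.mem_cons_of_mem _ hx)) with h' | h'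
          · exfalso; have := ha x hx; omega
          · exact h'
        · intro hx
          rcases List.mem_cons.mp ((h x).mpr (List.mem_cons_of_mem _ hx)) with h' | h'
          · exfalso; have := hb x hx; omega
          · exact h'
      rw [ih u ht hu ht']

lemma pvSmall_pairwise (A : Int) : (pvS A 1).Pairwise (· < ·) := by
  unfold pvS
  exact List.Pairwise.filter _ (PySem.List.pairwise_lt_pyRange_one (a := 1) (b := pvSqrt A + 1))

-- the divisor-pair list equals the full linear divisor scan
lemma pvDivisors_eq (A : Int) :
    pvS A 1 ++ ((pvS A 1).filterMap (pvCof A)).reverse =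
      (PySem.List.pyRange 1 (A + 1) 1).filter (fun r => decide (PySem.Int.mod A r = 0)) := by
  by_cases hA : 1 ≤ A
  · apply pvSortedExt
    · rw [List.pairwise_append]
      refine ⟨pvSmall_pairwise A, ?_, ?_⟩
      · rw [List.pairwise_reverse]
        apply pvPairwise_filterMap
        refine (pvSmall_pairwise A).imp_of_mem ?_
        intro a b hma hmb hab x hx y hy
        rcases (pvMem_small A a).mp hma with ⟨ha1, has, ham⟩
        rcases (pvMem_small A b).mp hmb with ⟨hb1, hbs, hbm⟩
        obtain ⟨hx', -⟩ := pvCof_some A a x hx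
        obtain ⟨hy', -⟩ := pvCof_some A b y hy
        subst hx' ; subst hy'
        exact pvDiv_antitone A a b hA ha1 hb1
          ((PySem.Int.mod_eq_zero_iff_dvd A a).mp ham)
          ((PySem.Int.mod_eq_zero_iff_dvd A b).mp hbm) hab
      · intro x hx y hy
        rw [List.mem_reverse] at hy
        rcases (pvMem_small A x).mp hx with ⟨-, hxs, -⟩
        rcases pvMem_large A y hA hy with ⟨hys, -, -⟩
        omega
    · exact List.Pairwise.filter _ (PySem.List.pairwise_lt_pyRange_one (a := 1) (b := A + 1))
    · intro m
      rw [List.mem_append, List.mem_reverse]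
      simp only [List.mem_filter, PySem.List.mem_pyRange_one, decide_eq_true_eq]
      constructor
      · rintro (hm | hm)
        · rcases (pvMem_small A m).mp hm with ⟨h1, h2, h3⟩
          have hs := pvSqrt_mul_le A (by omega)
          have hs1 := pvSqrt_pos A hA
          refine ⟨⟨h1, by nlinarith⟩, h3⟩
        · rcases pvMem_large A m hA hm with ⟨h1, h2, h3⟩
          have hs1 := pvSqrt_pos A hA
          exact ⟨⟨by omega, by omega⟩, h3⟩
      · rintro ⟨⟨h1, h2⟩, h3⟩
        have hdvd : m ∣ A := (PySem.Int.mod_eq_zero_iff_dvd A m).mp h3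
        by_cases hsm : m ≤ pvSqrt A
        · exact Or.inl ((pvMem_small A m).mpr ⟨h1, hsm, h3⟩)
        · push_neg at hsm
          obtain ⟨hmem, hcof⟩ := pvCof_back A m hA hsm (by omega) hdvd
          exact Or.inr (List.mem_filterMap.mpr ⟨_, hmem, hcof⟩)
  · have h1 : pvS A 1 = [] := by
      unfold pvS
      have h0 : A.toNat = 0 := by omega
      rw [show pvSqrt A = 0 by unfold pvSqrt; rw [h0]; simp]
      rw [PySem.List.pyRange_one_eq_nil (by omega)]
      rfl
    rw [h1, PySem.List.pyRange_one_eq_nil (by omega)]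
    simp

-- per-area block of port A
lemma pvInnerA (C A : Int) (acc : List (List Int)) :
    (PySem.List.pyRange 1 (A + 1) 1).foldl (fun acc row_size =>
      if PySem.Int.mod A row_size = 0 then
        let column_size := PySem.Int.floordiv A row_size
        if column_size < C + 1 then acc ++ [[0, 0, row_size - 1, column_size - 1]]
        else acc
      else acc) acc =
    acc ++ ((PySem.List.pyRange 1 (A + 1) 1).filter
      (fun r => decide (PySem.Int.floordiv A r ≤ C) && decide (PySem.Int.mod A r = 0))).map (pvG A) := by
  have hbody : (fun (acc : List (List Int)) (row_size : Int) =>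
      if PySem.Int.mod A row_size = 0 then
        let column_size := PySem.Int.floordiv A row_size
        if column_size < C + 1 then acc ++ [[0, 0, row_size - 1, column_size - 1]]
        else acc
      else acc) = (fun (acc : List (List Int)) (row_size : Int) =>
      if (decide (PySem.Int.floordiv A row_size ≤ C) && decide (PySem.Int.mod A row_size = 0)) = true
      then acc ++ [pvG A row_size] else acc) := by
    funext acc r
    by_cases h1 : PySem.Int.mod A r = 0 <;> by_cases h2 : PySem.Int.floordiv A r ≤ C
    · have h2' : PySem.Int.floordiv A r < C + 1 := by omega
      simp [h1, h2, h2', pvG]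
    · have h2' : ¬ PySem.Int.floordiv A r < C + 1 := by omega
      simp [h1, h2, h2']
    · simp [h1, h2]
    · simp [h1, h2]
  rw [hbody, PySem.List.foldl_append_if]

-- per-area block of port B
lemma pvInnerB (C A : Int) (acc : List (List Int)) :
    (pvS A 1 ++ ((pvS A 1).filterMap (pvCof A)).reverse).foldl (fun acc row_size =>
      let column_size := PySem.Int.floordiv A row_size
      if column_size ≤ C then acc ++ [[0, 0, row_size - 1, column_size - 1]]
      else acc) acc =
    acc ++ ((pvS A 1 ++ ((pvS A 1).filterMap (pvCof A)).reverse).filter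
      (fun r => decide (PySem.Int.floordiv A r ≤ C))).map (pvG A) := by
  generalize (pvS A 1 ++ ((pvS A 1).filterMap (pvCof A)).reverse) = l
  induction l generalizing acc with
  | nil => simp
  | cons x t ih =>
    simp only [List.foldl_cons, List.filter_cons]
    by_cases h2 : PySem.Int.floordiv A x ≤ C
    · simp [h2, ih, pvG]
    · simp [h2, ih]

def pvBlock (C A : Int) : List (List Int) :=
  ((PySem.List.pyRange 1 (A + 1) 1).filter
    (fun r => decide (PySem.Int.floordiv A r ≤ C) && decide (PySem.Int.mod A r = 0))).map (pvG A)

lemma pvBlock_nonpos (C A : Int) (hA : A ≤ 0) : pvBlock C A = [] := by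
  unfold pvBlock
  rw [PySem.List.pyRange_one_eq_nil (by omega)]
  rfl

lemma pvPortA_eq (R C L H : Int) :
    generate_all_slices R C L H = (PySem.List.pyRange (2 * L) (H + 1) 1).flatMap (pvBlock C) := by
  unfold generate_all_slices
  have h : (fun (list_of_slices : List (List Int)) (A : Int) =>
      (PySem.List.pyRange 1 (A + 1) 1).foldl (fun acc row_size =>
        if PySem.Int.mod A row_size = 0 then
          let column_size := PySem.Int.floordiv A row_size
          if column_size < C + 1 then acc ++ [[0, 0, row_size - 1, column_size - 1]]
          else acc
        else acc) list_of_slices) =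
      (fun (acc : List (List Int)) (A : Int) => acc ++ pvBlock C A) := by
    funext acc A
    simpa [pvBlock] using pvInnerA C A acc
  rw [h, PySem.List.foldl_append_eq_flatMap, List.nil_append]

lemma pvPortB_eq (R C L H : Int) :
    generate_all_slices_alt R C L H =
      (PySem.List.pyRange (if 2 * L > 1 then 2 * L else 1) (H + 1) 1).flatMap (pvBlock C) := by
  unfold generate_all_slices_alt
  have h : (fun (list_of_slices : List (List Int)) (A : Int) =>
      let p := pvDivLoop A 1 [] []
      (p.1 ++ p.2.reverse).foldl (fun acc row_size =>
        let column_size := PySem.Int.floordiv A row_size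
        if column_size ≤ C then acc ++ [[0, 0, row_size - 1, column_size - 1]]
        else acc) list_of_slices) =
      (fun (acc : List (List Int)) (A : Int) => acc ++ pvBlock C A) := by
    funext acc A
    show (let p := pvDivLoop A 1 [] []
      (p.1 ++ p.2.reverse).foldl (fun acc row_size =>
        let column_size := PySem.Int.floordiv A row_size
        if column_size ≤ C then acc ++ [[0, 0, row_size - 1, column_size - 1]]
        else acc) acc) = acc ++ pvBlock C A
    rw [pvDivLoop_spec A 1 le_rfl [] []]
    simp only [List.nil_append]
    rw [pvInnerB C A acc]
    rw [pvDivisors_eq A]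
    unfold pvBlock
    rw [List.filter_filter]
  rw [h, PySem.List.foldl_append_eq_flatMap, List.nil_append]

-- ===== VERDICT (by name: the statement is the Claim_ definition above) =====
theorem generate_all_slices_spec : Claim_equal_generate_all_slices := by
  intro R C L H _
  unfold Spec_generate_all_slices
  rw [pvPortA_eq, pvPortB_eq]
  by_cases hL : 2 * L > 1
  · rw [if_pos hL]
  · rw [if_neg hL]
    by_cases hH : (1:Int) ≤ H + 1
    · rw [PySem.List.pyRange_one_append (2 * L) 1 (H + 1) (by omega) hH,
        List.flatMap_append]
      have h0 : (PySem.List.pyRange (2 * L) 1 1).flatMap (pvBlock C) = [] := by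
        rw [List.flatMap_eq_nil_iff]
        intro x hx
        rw [PySem.List.mem_pyRange_one] at hx
        exact pvBlock_nonpos C x (by omega)
      rw [h0, List.nil_append]
    · rw [PySem.List.pyRange_one_eq_nil (a := (1:Int)) (by omega)]
      have h0 : (PySem.List.pyRange (2 * L) (H + 1) 1).flatMap (pvBlock C) = [] := by
        rw [List.flatMap_eq_nil_iff]
        intro x hx
        rw [PySem.List.mem_pyRange_one] at hx
        exact pvBlock_nonpos C x (by omega)
      rw [h0]
      rfl
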